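-- pv_equiv track=rewrite | github.com/Nearsoft/google-code-jam | solutions/double-or-one-thing/python/doubleOrOneThing.py | minLexOrd
-- ===== SOURCE A (Python) =====
-- def minLexOrd(str):
--     res = '' # Variable to store the result
--     for i in range(len(str)):
--         letter = str[-i - 1] # We loop backwards through each char.
--
--         """ We compare wether adding 1 or 2 characters to the word
--         would would result in a lower alphabetical order"""
--
--         if letter + letter + res > letter + res:
--             res = letter + res
--         else:
--             res = letter + letter + res
--
--     return res
-- ===== SOURCE B (Python) =====
-- def minLexOrd(str):
--     # One right-to-left pass with a boolean "double" flag; O(n) join at the end.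
--     pieces = []
--     double = False
--     prev = None
--     for c in reversed(str):
--         double = prev is not None and (c < prev or (c == prev and double))
--         pieces.append(c + c if double else c)
--         prev = c
--     return ''.join(reversed(pieces))
-- ===== Notes on version B (the rewrite author's own statement) =====
-- stated objective: faster
-- what changed: replaces A's per-step full-string concatenations and lexicographic comparisons of the growing result with a single right-to-left pass carrying one boolean flag (double s[i] iff s[i] < s[i+1], or equal and s[i+1] doubled), joining the pieces once at the end
import Mathlib
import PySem

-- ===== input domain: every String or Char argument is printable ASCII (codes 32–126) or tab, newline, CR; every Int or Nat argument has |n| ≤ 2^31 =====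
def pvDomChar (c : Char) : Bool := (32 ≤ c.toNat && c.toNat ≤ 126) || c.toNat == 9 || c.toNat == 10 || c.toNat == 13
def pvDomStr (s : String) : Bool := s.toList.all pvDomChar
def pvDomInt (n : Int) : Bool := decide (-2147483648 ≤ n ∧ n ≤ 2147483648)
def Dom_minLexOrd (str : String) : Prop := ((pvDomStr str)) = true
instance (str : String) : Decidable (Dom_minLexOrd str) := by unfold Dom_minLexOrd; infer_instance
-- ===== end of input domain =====

-- B replaces A's quadratic compare-and-prepend loop by a linear right-to-left pass
-- carrying a boolean "double" flag; objective: faster (asymptotic, O(n^2) -> O(n)).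

-- ===== PORT A =====
def minLexOrd (str : String) : String :=
  let s := str.toList
  let res := (PySem.List.pyRange 0 (PySem.List.len s) 1).foldl
    (fun res i =>
      -- letter = str[-i - 1]; the index is always in range here, so the default is never used
      let letter := PySem.List.pyGetD s (-i - 1) ' '
      if (letter :: res) < (letter :: letter :: res) then letter :: res
      else letter :: letter :: res) []
  String.ofList res

-- ===== PORT B =====
-- state: (pieces, double, prev); ''.join of strings is ported as flatten at the char level
def minLexOrd_alt (str : String) : String :=
  let st := str.toList.reverse.foldl
    (fun (st : List (List Char) × Bool × Option Char) c =>
      let double :=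
        match st.2.2 with
        | none => false
        | some p => decide (c < p ∨ (c = p ∧ st.2.1 = true))
      (st.1 ++ [if double then [c, c] else [c]], double, some c))
    ([], false, none)
  String.ofList st.1.reverse.flatten

-- ===== PRECONDITION & SPEC =====
def Spec_minLexOrd (str : String) (out : String) : Prop := out = minLexOrd_alt str
instance (str : String) (out : String) : Decidable (Spec_minLexOrd str out) := by unfold Spec_minLexOrd; infer_instance

-- ===== CLAIM (what is proved, stated in full; the proofs are below) =====
def Claim_equal_minLexOrd : Prop := ∀ (str : String), Dom_minLexOrd str → Spec_minLexOrd str (minLexOrd str)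

-- ===== LEMMAS AND PROOFS =====

-- A's loop body, as a function of the accumulated result and the current char
def pvStepA (res : List Char) (c : Char) : List Char :=
  if (c :: res) < (c :: c :: res) then c :: res else c :: c :: res

-- B's loop body
def pvStepB (st : List (List Char) × Bool × Option Char) (c : Char) :
    List (List Char) × Bool × Option Char :=
  let double :=
    match st.2.2 with
    | none => false
    | some p => decide (c < p ∨ (c = p ∧ st.2.1 = true))
  (st.1 ++ [if double then [c, c] else [c]], double, some c)

-- the invariant tying A's accumulated result to B's (pieces, double, prev) state
def pvInv (res : List Char) (st : List (List Char) × Bool × Option Char) : Prop :=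
  res = st.1.reverse.flatten ∧
  (match res with
   | [] => st.2.2 = none ∧ st.2.1 = false
   | h :: t => st.2.2 = some h ∧ st.2.1 = !decide (t < h :: t))

lemma pvLex_cons_cons (c : Char) (xs ys : List Char) :
    (c :: xs) < (c :: ys) ↔ xs < ys := by
  constructor
  · intro h
    cases h with
    | cons h => exact h
    | rel h => exact absurd h (lt_irrefl c)
  · intro h; exact List.Lex.cons h

lemma pvStep_preserves (res : List Char) (st : List (List Char) × Bool × Option Char)
    (h : pvInv res st) (c : Char) : pvInv (pvStepA res c) (pvStepB st c) := by
  obtain ⟨ps, db, pv⟩ := st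
  obtain ⟨hres, hhead⟩ := h
  cases res with
  | nil =>
    obtain ⟨hprev, hdbl⟩ := hhead
    dsimp only at hres hprev hdbl
    subst hprev; subst hdbl
    have hcond : ([c] : List Char) < [c, c] := (pvLex_cons_cons c [] [c]).mpr List.Lex.nil
    have hnil : (([] : List Char) < [c]) := List.Lex.nil
    dsimp only [pvStepA, pvStepB, pvInv]
    rw [if_pos hcond]
    exact ⟨by simp [← hres], rfl, by simp [hnil]⟩
  | cons h t =>
    obtain ⟨hprev, hdbl⟩ := hhead
    dsimp only at hres hprev hdbl
    subst hprev
    by_cases hg : (h :: t) < (c :: h :: t)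
    · -- A does not double
      have hc : (c :: h :: t) < (c :: c :: h :: t) := (pvLex_cons_cons c _ _).mpr hg
      have hB : decide (c < h ∨ (c = h ∧ db = true)) = false := by
        simp only [decide_eq_false_iff_not]
        rintro (hlt | ⟨rfl, hd⟩)
        · cases hg with
          | rel h' => exact absurd h' (lt_asymm hlt)
          | cons h' => exact lt_irrefl _ hlt
        · rw [hdbl] at hd
          have ht : ¬ (t < c :: t) := by
            simpa [Bool.not_eq_true', decide_eq_false_iff_not] using hd
          cases hg with
          | rel h' => exact lt_irrefl _ h'
          | cons h' => exact ht h'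
      dsimp only [pvStepA, pvStepB, pvInv]
      rw [if_pos hc]
      simp only [hB]
      exact ⟨by simp [← hres], trivial, by simp [hg]⟩
    · -- A doubles
      have hc : ¬ ((c :: h :: t) < (c :: c :: h :: t)) := fun hx => hg ((pvLex_cons_cons c _ _).mp hx)
      have hB : decide (c < h ∨ (c = h ∧ db = true)) = true := by
        simp only [decide_eq_true_eq]
        rcases lt_trichotomy c h with hlt | heq | hgt
        · exact Or.inl hlt
        · subst heq
          refine Or.inr ⟨rfl, ?_⟩
          have ht : ¬ (t < c :: t) := fun x => hg ((pvLex_cons_cons c t (c :: t)).mpr x)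
          simp [hdbl, ht]
        · exact absurd (List.Lex.rel hgt) hg
      dsimp only [pvStepA, pvStepB, pvInv]
      rw [if_neg hc]
      simp only [hB]
      exact ⟨by simp [← hres], trivial, by simp [hc]⟩

lemma pvFold_inv (r : List Char) (res : List Char)
    (st : List (List Char) × Bool × Option Char) (h : pvInv res st) :
    pvInv (r.foldl pvStepA res) (r.foldl pvStepB st) := by
  induction r generalizing res st with
  | nil => exact h
  | cons c r ih => exact ih _ _ (pvStep_preserves res st h c)

-- A's negative index into s is the nonnegative index into s.reverse
lemma pvNegIdx (s : List Char) (i : Int) (h0 : 0 ≤ i) (h1 : i < (s.length : Int)) (d : Char) :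
    PySem.List.pyGetD s (-i - 1) d = PySem.List.pyGetD s.reverse i d := by
  have hk : i.toNat < s.length := by omega
  have h1' : (i.toNat : Int) = i := Int.toNat_of_nonneg h0
  have hL : PySem.List.pyGetD s (-i - 1) d = s[s.length - (i.toNat + 1)] := by
    have := PySem.List.pyGetD_neg_natCast s (i.toNat + 1) d (by omega) (by omega)
    rw [← this]
    congr 1
    push_cast [h1']
    ring
  have hR : PySem.List.pyGetD s.reverse i d = s.reverse[i.toNat]'(by simpa using hk) := by
    exact PySem.List.pyGetD_eq_getElem s.reverse d h0 (by simpa using h1)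
  rw [hL, hR, List.getElem_reverse]
  congr 1
  omega

-- ===== VERDICT (by name: the statement is the Claim_ definition above) =====
theorem minLexOrd_spec : Claim_equal_minLexOrd := by
  intro str _
  unfold Spec_minLexOrd minLexOrd minLexOrd_alt
  dsimp only
  set s := str.toList with hs
  have hlen : PySem.List.len s = (s.reverse.length : Int) := by
    simp [PySem.List.len]
  have hcongr :
      (PySem.List.pyRange 0 (PySem.List.len s) 1).foldl
        (fun res i =>
          let letter := PySem.List.pyGetD s (-i - 1) ' '
          if (letter :: res) < (letter :: letter :: res) then letter :: res
          else letter :: letter :: res) [] =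
      (PySem.List.pyRange 0 (PySem.List.len s.reverse) 1).foldl
        (fun res i => pvStepA res (PySem.List.pyGetD s.reverse i ' ')) [] := by
    have hlen2 : PySem.List.len s = PySem.List.len s.reverse := by
      simp [PySem.List.len]
    rw [hlen2]
    apply PySem.List.foldl_congr_mem
    intro acc i hi
    rw [PySem.List.mem_pyRange_one] at hi
    have hi2 : i < (s.length : Int) := by
      have := hi.2
      simpa [PySem.List.len] using this
    simp only [pvStepA, pvNegIdx s i hi.1 hi2 ' ']
  rw [hcongr]
  rw [PySem.List.foldl_pyRange_pyGetD s.reverse ' ' pvStepA [] (le_refl 0)]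
  simp only [Int.toNat_zero, List.drop_zero]
  have hfoldB : s.reverse.foldl
      (fun (st : List (List Char) × Bool × Option Char) c =>
        let double :=
          match st.2.2 with
          | none => false
          | some p => decide (c < p ∨ (c = p ∧ st.2.1 = true))
        (st.1 ++ [if double then [c, c] else [c]], double, some c))
      ([], false, none) = s.reverse.foldl pvStepB ([], false, none) := rfl
  rw [hfoldB]
  have hinv : pvInv (s.reverse.foldl pvStepA [])
      (s.reverse.foldl pvStepB ([], false, none)) :=
    pvFold_inv s.reverse [] ([], false, none) ⟨by simp, by exact ⟨rfl, rfl⟩⟩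
  rw [hinv.1]
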